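-- pv_equiv track=rewrite | github.com/joowop/Algorithm | 프로그래머스/unrated/135808. 과일 장수/과일 장수.py | solution
-- ===== SOURCE A (Python) =====
-- def solution(k, m, score):
--     a = []
--     answer = 0
--     score.sort(reverse = True)
--
--     for i in range(len(score)):
--         if (i+1) % m == 0:
--             answer += score[i] * m
--     return answer
-- ===== SOURCE B (Python) =====
-- def solution(k, m, score):
--     # histogram approach: count each score value, walk distinct values from high
--     # to low, and count how many box-closing positions (multiples of m) fall in
--     # each value's run of positions using floor-division arithmetic.
--     counts = {}
--     for v in score:
--         counts[v] = counts.get(v, 0) + 1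
--     answer = 0
--     pos = 0
--     for v in sorted(counts, reverse=True):
--         c = counts[v]
--         answer += m * v * ((pos + c) // m - pos // m)
--         pos += c
--     return answer
-- ===== Notes on version B (the rewrite author's own statement) =====
-- stated objective: alternative
-- what changed: B replaces A's per-index scan of the descending-sorted list (the (i+1)%m==0 trick) by a value histogram: it builds a dict of counts, walks the distinct values from high to low keeping a running position, and adds m*v*((pos+c)//m - pos//m) box-closing positions per value run, never indexing the sorted list.
-- outside the precondition, e.g. on solution(1, -2, [3, 1]): A returns -2, B returns 6; on solution(1, 0, [3, 1]): A raises ZeroDivisionError, B raises ZeroDivisionError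
import Mathlib
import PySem

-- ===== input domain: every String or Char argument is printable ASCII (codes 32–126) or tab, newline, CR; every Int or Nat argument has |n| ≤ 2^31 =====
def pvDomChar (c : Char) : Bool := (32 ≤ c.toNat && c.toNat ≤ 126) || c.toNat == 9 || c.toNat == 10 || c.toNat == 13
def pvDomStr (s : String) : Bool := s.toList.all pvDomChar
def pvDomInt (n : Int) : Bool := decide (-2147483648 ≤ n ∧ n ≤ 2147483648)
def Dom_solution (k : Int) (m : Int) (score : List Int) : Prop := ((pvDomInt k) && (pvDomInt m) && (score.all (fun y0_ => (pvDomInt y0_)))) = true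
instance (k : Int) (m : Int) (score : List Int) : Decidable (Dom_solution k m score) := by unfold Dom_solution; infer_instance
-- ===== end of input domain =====

-- B counts scores in a histogram and walks distinct values high-to-low, adding m*v*((pos+c)//m - pos//m)
-- per value run (objective: alternative algorithm). A sorts `score` in place in Python, B does not; the
-- equivalence proved here is about the return value only.


-- ===== PORT A =====
def solution (k : Int) (m : Int) (score : List Int) : Int :=
  -- a = [] is unused in A; answer starts at 0; score.sort(reverse=True)
  let s := PySem.List.sorted score (fun x => x) true
  -- for i in range(len(score)): if (i+1) % m == 0: answer += score[i] * m
  (PySem.List.pyRange 0 (s.length : Int) 1).foldl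
    (fun answer i =>
      if PySem.Int.mod (i + 1) m == 0 then answer + (PySem.List.pyGetD s i 0) * m else answer) 0

-- ===== PORT B =====
def solution_alt (k : Int) (m : Int) (score : List Int) : Int :=
  -- counts = {}; for v in score: counts[v] = counts.get(v, 0) + 1
  let counts := score.foldl (fun d v => d.insert v (d.getD v 0 + 1)) PySem.Dict.empty
  -- answer = 0; pos = 0; for v in sorted(counts, reverse=True): ...
  let st := (PySem.List.sorted counts.keys (fun x => x) true).foldl
    (fun (st : Int × Int) v =>
      let c := counts.getD v 0
      (st.1 + m * v * (PySem.Int.floordiv (st.2 + c) m - PySem.Int.floordiv st.2 m), st.2 + c))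
    (0, 0)
  st.1

-- ===== PRECONDITION & SPEC =====
-- Pre_ restricts to a positive box size m, the task's natural domain: at m = 0 both A and B raise
-- ZeroDivisionError, and for negative m A's (i+1)%m index trick returns accidental negative totals.
def Pre_solution (k : Int) (m : Int) (score : List Int) : Prop := 1 ≤ m
instance (k : Int) (m : Int) (score : List Int) : Decidable (Pre_solution k m score) := by unfold Pre_solution; infer_instance
def pvWitness_solution : Int × Int × List Int := (4, 3, [4, 1, 2, 2, 4, 2, 4, 4, 1, 2, 4, 2])
def Spec_solution (k : Int) (m : Int) (score : List Int) (out : Int) : Prop := out = solution_alt k m score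
instance (k : Int) (m : Int) (score : List Int) (out : Int) : Decidable (Spec_solution k m score out) := by unfold Spec_solution; infer_instance

-- ===== CLAIM (what is proved, stated in full; the proofs are below) =====
def Claim_equal_solution : Prop := ∀ (k : Int) (m : Int) (score : List Int), Dom_solution k m score → Pre_solution k m score → Spec_solution k m score (solution k m score)

-- ===== LEMMAS AND PROOFS =====

-- 1-based position walk: add x*m whenever the position is a multiple of m
def pvGo (m : Int) : List Int → Int → Int
  | [], _ => 0
  | x :: xs, j => (if PySem.Int.mod j m == 0 then x * m else 0) + pvGo m xs (j + 1)

-- floordiv steps by 1 exactly at the multiples of m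
theorem pv_fd_succ (m p : Int) (hm : 1 ≤ m) :
    PySem.Int.floordiv (p + 1) m - PySem.Int.floordiv p m
      = if PySem.Int.mod (p + 1) m == 0 then 1 else 0 := by
  have hm' : (0:Int) < m := by omega
  have hq := (PySem.Int.floordiv_eq_iff_of_pos hm' (a := p) (q := PySem.Int.floordiv p m)).mp rfl
  set q := PySem.Int.floordiv p m with hqd
  by_cases h : m ∣ (p + 1)
  · have hmod : PySem.Int.mod (p + 1) m = 0 := (PySem.Int.mod_eq_zero_iff_dvd _ _).mpr h
    obtain ⟨t, ht⟩ := h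
    have htq : q < t := by nlinarith
    have h1 : (q + 1) * m ≤ p + 1 := by nlinarith
    have h2 : p + 1 < (q + 1 + 1) * m := by nlinarith
    have : PySem.Int.floordiv (p + 1) m = q + 1 :=
      (PySem.Int.floordiv_eq_iff_of_pos hm').mpr ⟨h1, h2⟩
    simp [this, hmod]
  · have hmod : ¬ (PySem.Int.mod (p + 1) m = 0) := fun hc => h ((PySem.Int.mod_eq_zero_iff_dvd _ _).mp hc)
    have h2 : p + 1 < (q + 1) * m := by
      rcases lt_or_eq_of_le (show p + 1 ≤ (q + 1) * m by omega) with h' | h'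
      · exact h'
      · exact absurd ⟨q + 1, by linarith [h']⟩ h
    have : PySem.Int.floordiv (p + 1) m = q :=
      (PySem.Int.floordiv_eq_iff_of_pos hm').mpr ⟨by omega, h2⟩
    simp [this, hmod]

-- A's index fold = the position walk over the sorted list
theorem pv_A_eq_go (m : Int) (s : List Int) :
    ∀ (n : Nat) (a : Nat) (acc : Int), a + n = s.length →
    ((PySem.List.pyRange (a : Int) (s.length : Int) 1).foldl
      (fun answer i => if PySem.Int.mod (i + 1) m == 0 then answer + (PySem.List.pyGetD s i 0) * m else answer) acc)
      = acc + pvGo m (s.drop a) ((a : Int) + 1) := by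
  intro n
  induction n with
  | zero =>
    intro a acc ha
    rw [PySem.List.pyRange_one_eq_nil (by omega), List.drop_of_length_le (by omega)]
    simp [pvGo]
  | succ n ih =>
    intro a acc ha
    have hlt : a < s.length := by omega
    rw [PySem.List.pyRange_one_cons (by exact_mod_cast hlt), List.foldl_cons,
        List.drop_eq_getElem_cons hlt]
    have hget : PySem.List.pyGetD s (a : Int) 0 = s[a] := by
      rw [PySem.List.pyGetD_eq_getElem s 0 (by omega) (by exact_mod_cast hlt)]
      simp
    have ih' := ih (a + 1)
      (if (PySem.Int.mod ((a : Int) + 1) m == 0) = true then acc + PySem.List.pyGetD s (a : Int) 0 * m else acc)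
      (by omega)
    push_cast at ih'
    rw [ih']
    simp only [pvGo, hget]
    by_cases h : PySem.Int.mod ((a : Int) + 1) m == 0
    · simp [h]
      ring
    · simp [h]

-- one run of c equal values contributes m*v*((pos+c)//m - pos//m)
theorem pv_go_run (m v : Int) (hm : 1 ≤ m) (c : Nat) (rest : List Int) :
    ∀ (pos : Int), 0 ≤ pos →
    pvGo m (List.replicate c v ++ rest) (pos + 1)
      = m * v * (PySem.Int.floordiv (pos + (c : Int)) m - PySem.Int.floordiv pos m)
          + pvGo m rest (pos + (c : Int) + 1) := by
  induction c with
  | zero => intro pos hp; simp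
  | succ c ih =>
    intro pos hp
    rw [List.replicate_succ, List.cons_append]
    simp only [pvGo]
    rw [ih (pos + 1) (by omega)]
    push_cast
    rw [show pos + ((c:Int) + 1) = pos + 1 + (c:Int) from by ring]
    have hstep := pv_fd_succ m pos hm
    by_cases h : PySem.Int.mod (pos + 1) m == 0
    · simp only [h, if_true] at hstep ⊢
      have hB : PySem.Int.floordiv (pos + 1) m = PySem.Int.floordiv pos m + 1 := by omega
      rw [hB]; ring
    · rw [if_neg h] at hstep
      have hB : PySem.Int.floordiv (pos + 1) m = PySem.Int.floordiv pos m := by omega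
      rw [hB, if_neg h]
      ring

-- B's fold over the distinct values = the position walk over the flattened runs
theorem pv_B_fold (m : Int) (hm : 1 ≤ m) (score : List Int) (ks : List Int) :
    ∀ (acc pos : Int), 0 ≤ pos →
    (ks.foldl
      (fun (st : Int × Int) v =>
        (st.1 + m * v * (PySem.Int.floordiv (st.2 + (score.count v : Int)) m
            - PySem.Int.floordiv st.2 m), st.2 + (score.count v : Int)))
      (acc, pos)).1
      = acc + pvGo m (ks.flatMap (fun v => List.replicate (score.count v) v)) (pos + 1) := by
  induction ks with
  | nil => intro acc pos hp; simp [pvGo]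
  | cons v ks ih =>
    intro acc pos hp
    rw [List.foldl_cons, List.flatMap_cons]
    rw [ih _ _ (by positivity)]
    rw [pv_go_run m v hm (score.count v) _ pos hp]
    ring

-- count of each value in the flattened runs
theorem pv_count_flat (score ks : List Int) (hnd : ks.Nodup) (a : Int) :
    (ks.flatMap (fun v => List.replicate (score.count v) v)).count a
      = if a ∈ ks then score.count a else 0 := by
  induction ks with
  | nil => simp
  | cons v ks ih =>
    rw [List.flatMap_cons, List.count_append, List.count_replicate,
        ih (List.Nodup.of_cons hnd)]
    by_cases h : a = v
    · subst h
      have : a ∉ ks := (List.nodup_cons.mp hnd).1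
      simp [this]
    · simp [h, Ne.symm h]

theorem pv_flat_pairwise (score ks : List Int) (hpw : ks.Pairwise (fun a b => b < a)) :
    (ks.flatMap (fun v => List.replicate (score.count v) v)).Pairwise (fun a b => b ≤ a) := by
  induction ks with
  | nil => simp
  | cons v ks ih =>
    rw [List.flatMap_cons, List.pairwise_append]
    refine ⟨?_, ih hpw.of_cons, ?_⟩
    · rw [List.pairwise_replicate]
      right; exact le_refl v
    · intro a ha b hb
      have ha' : a = v := List.eq_of_mem_replicate ha
      rcases List.mem_flatMap.mp hb with ⟨w, hw, hbw⟩
      have hb' : b = w := List.eq_of_mem_replicate hbw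
      have := (List.pairwise_cons.mp hpw).1 w hw
      omega

theorem pv_flat_eq_sorted (score : List Int) :
    (PySem.List.sorted (PySem.Set.ofList score) (fun x => x) true).flatMap
        (fun v => List.replicate (score.count v) v)
      = PySem.List.sorted score (fun x => x) true := by
  set ks := PySem.List.sorted (PySem.Set.ofList score) (fun x => x) true with hks
  have hperm : ks.Perm (PySem.Set.ofList score) := PySem.List.sorted_perm _ _ _
  have hnd : ks.Nodup := hperm.symm.nodup (PySem.Set.nodup_ofList score)
  have hle : ks.Pairwise (fun a b => b ≤ a) := PySem.List.sorted_pairwise_rev _ _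
  have hlt : ks.Pairwise (fun a b => b < a) := by
    have := List.Pairwise.and hle (List.Pairwise.imp (fun h => h) hnd)
    exact this.imp (fun ⟨h1, h2⟩ => lt_of_le_of_ne h1 (Ne.symm h2))
  have hp : (ks.flatMap (fun v => List.replicate (score.count v) v)).Perm
      (PySem.List.sorted score (fun x => x) true) := by
    apply (List.perm_iff_count).mpr
    intro a
    rw [pv_count_flat score ks hnd a]
    have hmem : a ∈ ks ↔ a ∈ score := by
      rw [hks, PySem.List.mem_sorted, PySem.Set.mem_ofList]
    rw [(PySem.List.sorted_perm score (fun x => x) true).count_eq a]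
    by_cases h : a ∈ score
    · simp [hmem, h]
    · simp [hmem, h, List.count_eq_zero_of_not_mem h]
  exact List.Perm.eq_of_pairwise (fun a b _ _ h1 h2 => le_antisymm h2 h1)
    (pv_flat_pairwise score ks hlt) (PySem.List.sorted_pairwise_rev _ _) hp

-- ===== VERDICT (by name: the statement is the Claim_ definition above) =====
theorem solution_spec : Claim_equal_solution := by
  intro k m score _ hpre
  unfold Spec_solution solution solution_alt
  simp only [PySem.Dict.foldl_insert_getD_add_one_eq_counter, PySem.Dict.getD_counter,
    PySem.Dict.keys_counter]
  rw [pv_B_fold m hpre score _ 0 0 le_rfl, pv_flat_eq_sorted score]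
  have hA := pv_A_eq_go m (PySem.List.sorted score (fun x => x) true)
    (PySem.List.sorted score (fun x => x) true).length 0 0 (by omega)
  simp only [Nat.cast_zero, List.drop_zero, zero_add] at hA ⊢
  rw [hA]
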